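-- pv_equiv track=rewrite | github.com/fispact/peakingduck | peakingduck/plotting/helpers.py | getplotvalues
-- ===== SOURCE A (Python) =====
-- def getplotvalues(x,y):
--     """
--         Matplotlib hist is slow. Use a hist like plot with conventional line plot
--     """
--     assert (len(y) + 1) == len(x)
--     X = []
--     Y = []
--     for i in range(len(x)-1):
--         X.append(x[i])
--         Y.append(y[i])
--         X.append(x[i+1])
--         Y.append(y[i])
--     return X, Y
-- ===== SOURCE B (Python) =====
-- def getplotvalues(x, y):
--     """
--         Matplotlib hist is slow. Use a hist like plot with conventional line plot
--     """
--     assert (len(y) + 1) == len(x)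
--     Y = [v for v in y for _ in range(2)]
--     X = [e for e in x for _ in range(2)][1:-1]
--     return X, Y
-- ===== Notes on version B (the rewrite author's own statement) =====
-- stated objective: simpler
-- what changed: Replaces the pairwise index loop with two independent duplicate-every-element passes, trimming X's outer copies with a [1:-1] slice instead of indexing neighbouring bin edges.
import Mathlib
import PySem

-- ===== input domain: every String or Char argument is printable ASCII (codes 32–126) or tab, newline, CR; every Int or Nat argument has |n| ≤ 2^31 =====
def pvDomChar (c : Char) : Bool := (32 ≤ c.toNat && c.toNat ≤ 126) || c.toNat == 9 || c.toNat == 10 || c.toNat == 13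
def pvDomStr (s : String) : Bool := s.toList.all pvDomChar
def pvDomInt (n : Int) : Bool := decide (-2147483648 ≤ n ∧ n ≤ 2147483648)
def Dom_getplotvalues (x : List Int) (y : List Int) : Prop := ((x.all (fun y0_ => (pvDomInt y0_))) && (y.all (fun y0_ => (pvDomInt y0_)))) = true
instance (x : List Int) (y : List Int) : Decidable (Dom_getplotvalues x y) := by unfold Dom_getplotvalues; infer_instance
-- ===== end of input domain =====

-- B builds Y and X by duplicating every element in two independent passes and trimming X with a [1:-1] slice, instead of A's pairwise index loop (simpler decomposition, same cost).


-- ===== PORT A =====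
-- assert (len(y)+1)==len(x) raises AssertionError when violated: excluded by Pre_ below
def getplotvalues (x : List Int) (y : List Int) : List Int × List Int :=
  (PySem.List.pyRange 0 ((x.length : Int) - 1) 1).foldl
    (fun (p : List Int × List Int) i =>
      (p.1 ++ [PySem.List.pyGetD x i 0, PySem.List.pyGetD x (i + 1) 0],
       p.2 ++ [PySem.List.pyGetD y i 0, PySem.List.pyGetD y i 0]))
    ([], [])

-- ===== PORT B =====
def getplotvalues_alt (x : List Int) (y : List Int) : List Int × List Int :=
  let Y := y.flatMap (fun v => [v, v])
  let X := PySem.List.slice (x.flatMap (fun e => [e, e])) (some 1) (some (-1))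
  (X, Y)

-- ===== PRECONDITION & SPEC =====
-- Pre_ excludes exactly the inputs where A's assert fails (AssertionError): len(x) must be len(y)+1
def Pre_getplotvalues (x : List Int) (y : List Int) : Prop := x.length = y.length + 1
instance (x : List Int) (y : List Int) : Decidable (Pre_getplotvalues x y) := by unfold Pre_getplotvalues; infer_instance
def pvWitness_getplotvalues : List Int × List Int := ([0, 5], [3])
def Spec_getplotvalues (x : List Int) (y : List Int) (out : List Int × List Int) : Prop := out = getplotvalues_alt x y
instance (x : List Int) (y : List Int) (out : List Int × List Int) : Decidable (Spec_getplotvalues x y out) := by unfold Spec_getplotvalues; infer_instance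

-- ===== CLAIM (what is proved, stated in full; the proofs are below) =====
def Claim_equal_getplotvalues : Prop := ∀ (x : List Int) (y : List Int), Dom_getplotvalues x y → Pre_getplotvalues x y → Spec_getplotvalues x y (getplotvalues x y)

-- ===== LEMMAS AND PROOFS =====
lemma foldl_pair_append {α : Type} (l : List α) (f g : α → List Int) (X0 Y0 : List Int) :
    l.foldl (fun (p : List Int × List Int) i => (p.1 ++ f i, p.2 ++ g i)) (X0, Y0)
      = (X0 ++ l.flatMap f, Y0 ++ l.flatMap g) := by
  induction l generalizing X0 Y0 with
  | nil => simp
  | cons a t ih => simp [List.foldl_cons, ih, List.flatMap_cons]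

lemma flatMap_range_Y (y : List Int) :
    (List.range y.length).flatMap (fun i => [y.getD i 0, y.getD i 0])
      = y.flatMap (fun v => [v, v]) := by
  induction y with
  | nil => simp
  | cons a t ih =>
      simp only [List.length_cons, List.range_succ_eq_map, List.flatMap_cons,
        List.flatMap_map, List.getD_cons_zero, List.getD_cons_succ, List.flatMap_cons]
      simpa using ih

lemma flatMap_range_X (x : List Int) (n : Nat) (h : x.length = n + 1) :
    (List.range n).flatMap (fun i => [x.getD i 0, x.getD (i + 1) 0])
      = (((x.flatMap (fun e => [e, e])).drop 1).dropLast) := by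
  induction n generalizing x with
  | zero =>
      match x, h with
      | [a], _ => simp
  | succ m ih =>
      match x, h with
      | a :: b :: t, h =>
        have ht : (b :: t).length = m + 1 := by simpa using h
        have := ih (b :: t) ht
        simp only [List.range_succ_eq_map, List.flatMap_cons, List.flatMap_map,
          List.getD_cons_zero, List.getD_cons_succ] at this ⊢
        rw [this]
        simp [List.dropLast_cons₂]

lemma slice_one_negone (xs : List Int) :
    PySem.List.slice xs (some 1) (some (-1)) = (xs.drop 1).dropLast := by
  cases xs with
  | nil => simp [PySem.List.slice]
  | cons a t =>
      simp only [PySem.List.slice, PySem.List.clampIdx, List.dropLast_eq_take]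
      split_ifs <;> simp_all <;> omega


-- ===== VERDICT (by name: the statement is the Claim_ definition above) =====
theorem getplotvalues_spec : Claim_equal_getplotvalues := by
  intro x y _ hpre
  unfold Spec_getplotvalues getplotvalues getplotvalues_alt
  have hx : ((x.length : Int) - 1) = (y.length : Int) := by
    rw [hpre]; push_cast; ring
  dsimp only
  rw [hx, PySem.List.pyRange_zero, List.foldl_map, Int.toNat_natCast,
    foldl_pair_append (List.range y.length)
      (fun i => [PySem.List.pyGetD x (i : Int) 0, PySem.List.pyGetD x ((i : Int) + 1) 0])
      (fun i => [PySem.List.pyGetD y (i : Int) 0, PySem.List.pyGetD y (i : Int) 0]) [] [],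
    slice_one_negone]
  simp only [List.nil_append, Prod.mk.injEq]
  constructor
  · rw [← flatMap_range_X x y.length hpre]
    refine List.flatMap_congr ?_
    intro i hi
    have h1 : PySem.List.pyGetD x (i : Int) 0 = x.getD i 0 := PySem.List.pyGetD_natCast x i 0
    have h2 : PySem.List.pyGetD x ((i : Int) + 1) 0 = x.getD (i + 1) 0 := by
      rw [show ((i : Int) + 1) = ((i + 1 : Nat) : Int) from by push_cast; ring]
      exact PySem.List.pyGetD_natCast x (i + 1) 0
    rw [h1, h2]
  · rw [← flatMap_range_Y y]
    refine List.flatMap_congr ?_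
    intro i hi
    rw [PySem.List.pyGetD_natCast y i 0]
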